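-- pv_equiv track=rewrite | github.com/baskaranangappan/gherkinscriptgenerator | core/gherkin_generator.py | _clean_gherkin_output
-- ===== SOURCE A (Python) =====
-- def _clean_gherkin_output(content: str) -> str:
--     """Clean and format Gherkin output"""
--     # Remove markdown code blocks if present
--     content = content.replace("```gherkin", "").replace("```", "")
--
--     # Remove any user story sections if LLM added them
--     lines = content.split('\n')
--     cleaned_lines = []
--     skip_until_scenario = False
--
--     for line in lines:
--         stripped = line.strip()
--
--         # Skip user story lines
--         if stripped.startswith('As a') or stripped.startswith('I want') or stripped.startswith('So that'):
--             skip_until_scenario = True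
--             continue
--
--         # Skip Background sections
--         if stripped.startswith('Background:'):
--             skip_until_scenario = True
--             continue
--
--         # Stop skipping when we hit Feature or Scenario
--         if stripped.startswith('Feature:') or stripped.startswith('Scenario:'):
--             skip_until_scenario = False
--
--         # Don't skip if not in skip mode
--         if not skip_until_scenario and line.strip():
--             cleaned_lines.append(line.rstrip())
--
--     # Remove excessive blank lines and add proper spacing after Feature
--     final_lines = []
--     prev_blank = False
--     for i, line in enumerate(cleaned_lines):
--         if not line.strip():
--             if not prev_blank:
--                 final_lines.append(line)
--                 prev_blank = True
--         else:
--             final_lines.append(line)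
--             prev_blank = False
--
--             # Add blank line after Feature statement
--             if line.strip().startswith('Feature:'):
--                 final_lines.append('')
--
--     return '\n'.join(final_lines)
-- ===== SOURCE B (Python) =====
-- def _clean_gherkin_output(content: str) -> str:
--     """Clean and format Gherkin output (single fused pass)."""
--     content = content.replace("```gherkin", "").replace("```", "")
--     out = []
--     skip = False
--     for line in content.split('\n'):
--         stripped = line.strip()
--         if stripped.startswith(('As a', 'I want', 'So that', 'Background:')):
--             skip = True
--             continue
--         if stripped.startswith(('Feature:', 'Scenario:')):
--             skip = False
--         if not skip and stripped:
--             out.append(line.rstrip())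
--             if stripped.startswith('Feature:'):
--                 out.append('')
--     return '\n'.join(out)
-- ===== Notes on version B (the rewrite author's own statement) =====
-- stated objective: simpler
-- what changed: B fuses A's two passes into a single loop over the split lines that appends each kept line (and the blank line after a Feature line) immediately, dropping A's second pass and its prev_blank bookkeeping since the first pass never keeps a blank line.
import Mathlib
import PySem

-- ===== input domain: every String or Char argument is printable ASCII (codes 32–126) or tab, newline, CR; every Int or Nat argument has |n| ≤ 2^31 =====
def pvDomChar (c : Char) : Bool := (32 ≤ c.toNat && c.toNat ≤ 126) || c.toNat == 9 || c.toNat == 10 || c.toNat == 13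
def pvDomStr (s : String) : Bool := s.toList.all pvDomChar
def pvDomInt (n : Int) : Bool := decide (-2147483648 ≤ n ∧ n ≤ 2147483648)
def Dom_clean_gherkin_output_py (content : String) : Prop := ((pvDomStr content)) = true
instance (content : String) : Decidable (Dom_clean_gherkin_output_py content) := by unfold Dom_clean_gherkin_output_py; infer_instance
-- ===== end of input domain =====

-- B fuses A's two passes into one loop that emits each kept line (and the blank line after a Feature line) immediately; objective: simpler.

-- ===== PORT A =====
-- body of A's first loop: drop user-story/Background lines, keep non-blank lines rstripped
-- ('not skip and line.strip()' is ported as the equivalent short-circuit nested ifs)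
def pvStepA1 (acc : List String × Bool) (line : String) : List String × Bool :=
  let stripped := PySem.Str.strip line
  if PySem.Str.startswith stripped "As a" || PySem.Str.startswith stripped "I want" || PySem.Str.startswith stripped "So that" then
    (acc.1, true)
  else if PySem.Str.startswith stripped "Background:" then
    (acc.1, true)
  else
    let skip := if PySem.Str.startswith stripped "Feature:" || PySem.Str.startswith stripped "Scenario:" then false else acc.2
    if skip then (acc.1, skip)
    else if PySem.Str.strip line == "" then (acc.1, skip)
    else (acc.1 ++ [PySem.Str.rstrip line], skip)

-- body of A's second loop: collapse blank runs, add a blank line after each Feature line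
def pvStepA2 (acc : List String × Bool) (line : String) : List String × Bool :=
  if PySem.Str.strip line == "" then
    if !acc.2 then (acc.1 ++ [line], true) else acc
  else
    let fl := acc.1 ++ [line]
    if PySem.Str.startswith (PySem.Str.strip line) "Feature:" then (fl ++ [""], false) else (fl, false)

def clean_gherkin_output_py (content : String) : String :=
  let content := PySem.Str.replace (PySem.Str.replace content "```gherkin" "") "```" ""
  let lines := (PySem.Str.split? content "\n").getD []    -- sep "\n" ≠ "", so split? is always some
  let cleaned := (lines.foldl pvStepA1 ([], false)).1
  let final := (cleaned.foldl pvStepA2 ([], false)).1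
  PySem.Str.join "\n" final

-- ===== PORT B =====
-- body of B's single fused loop
def pvStepB (acc : List String × Bool) (line : String) : List String × Bool :=
  let stripped := PySem.Str.strip line
  if PySem.Str.startswith stripped "As a" || PySem.Str.startswith stripped "I want" || PySem.Str.startswith stripped "So that" || PySem.Str.startswith stripped "Background:" then
    (acc.1, true)
  else
    let skip := if PySem.Str.startswith stripped "Feature:" || PySem.Str.startswith stripped "Scenario:" then false else acc.2
    if skip then (acc.1, skip)
    else if stripped == "" then (acc.1, skip)
    else if PySem.Str.startswith stripped "Feature:" then (acc.1 ++ [PySem.Str.rstrip line] ++ [""], skip)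
    else (acc.1 ++ [PySem.Str.rstrip line], skip)

def clean_gherkin_output_py_alt (content : String) : String :=
  let content := PySem.Str.replace (PySem.Str.replace content "```gherkin" "") "```" ""
  let lines := (PySem.Str.split? content "\n").getD []    -- sep "\n" ≠ "", so split? is always some
  PySem.Str.join "\n" (lines.foldl pvStepB ([], false)).1

-- ===== PRECONDITION & SPEC =====
def Spec_clean_gherkin_output_py (content : String) (out : String) : Prop := out = clean_gherkin_output_py_alt content
instance (content : String) (out : String) : Decidable (Spec_clean_gherkin_output_py content out) := by unfold Spec_clean_gherkin_output_py; infer_instance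

-- ===== CLAIM (what is proved, stated in full; the proofs are below) =====
def Claim_equal_clean_gherkin_output_py : Prop := ∀ (content : String), Dom_clean_gherkin_output_py content → Spec_clean_gherkin_output_py content (clean_gherkin_output_py content)

-- ===== LEMMAS AND PROOFS =====

-- what A's second pass produces from a blank-free list (and what B emits directly)
def pvExpand (l : List String) : List String :=
  l.flatMap (fun x => x :: (if PySem.Str.startswith (PySem.Str.strip x) "Feature:" then [""] else []))

theorem pv_lstrip_rstrip_comm (cs : List Char) :
    PySem.Chars.lstrip (PySem.Chars.rstrip cs) = PySem.Chars.rstrip (PySem.Chars.lstrip cs) := by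
  induction cs with
  | nil => rfl
  | cons c t ih =>
    have hd : List.dropWhile PySem.Chars.isspace (t.reverse ++ [c]) =
        if (List.dropWhile PySem.Chars.isspace t.reverse).isEmpty then
          List.dropWhile PySem.Chars.isspace [c]
        else List.dropWhile PySem.Chars.isspace t.reverse ++ [c] := List.dropWhile_append
    by_cases he : (List.dropWhile PySem.Chars.isspace t.reverse).isEmpty = true
    · have ht : List.dropWhile PySem.Chars.isspace t.reverse = [] := List.isEmpty_iff.mp he
      have hrt : PySem.Chars.rstrip t = [] := by simp [PySem.Chars.rstrip, ht]
      by_cases h : PySem.Chars.isspace c = true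
      · have hlhs : PySem.Chars.rstrip (c :: t) = [] := by
          simp [PySem.Chars.rstrip, List.reverse_cons, hd, he, h]
        have hrhs : PySem.Chars.rstrip (PySem.Chars.lstrip t) = [] := by
          rw [← ih, hrt]; rfl
        rw [hlhs]
        simp [PySem.Chars.lstrip, h] at hrhs ⊢
        exact hrhs
      · have hlhs : PySem.Chars.rstrip (c :: t) = [c] := by
          simp [PySem.Chars.rstrip, List.reverse_cons, hd, he, h]
        have hl : PySem.Chars.lstrip (c :: t) = c :: t := by
          simp [PySem.Chars.lstrip, List.dropWhile_cons, h]
        rw [hlhs, hl, hlhs]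
        simp [PySem.Chars.lstrip, List.dropWhile_cons, h]
    · have hcons : PySem.Chars.rstrip (c :: t) = c :: PySem.Chars.rstrip t := by
        simp [PySem.Chars.rstrip, List.reverse_cons, hd, he]
      by_cases h : PySem.Chars.isspace c = true
      · calc PySem.Chars.lstrip (PySem.Chars.rstrip (c :: t))
            = PySem.Chars.lstrip (PySem.Chars.rstrip t) := by
              rw [hcons]; simp [PySem.Chars.lstrip, List.dropWhile_cons, h]
          _ = PySem.Chars.rstrip (PySem.Chars.lstrip t) := ih
          _ = PySem.Chars.rstrip (PySem.Chars.lstrip (c :: t)) := by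
              simp [PySem.Chars.lstrip, List.dropWhile_cons, h]
      · have hl : PySem.Chars.lstrip (c :: t) = c :: t := by
          simp [PySem.Chars.lstrip, List.dropWhile_cons, h]
        have hl2 : PySem.Chars.lstrip (c :: PySem.Chars.rstrip t) = c :: PySem.Chars.rstrip t := by
          simp [PySem.Chars.lstrip, List.dropWhile_cons, h]
        rw [hcons, hl2, hl, hcons]

theorem pv_dropWhile_idem (p : Char → Bool) (l : List Char) :
    (l.dropWhile p).dropWhile p = l.dropWhile p := by
  induction l with
  | nil => simp
  | cons c t ih => by_cases h : p c <;> simp [List.dropWhile_cons, h, ih]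

theorem pv_chars_rstrip_idem (cs : List Char) :
    PySem.Chars.rstrip (PySem.Chars.rstrip cs) = PySem.Chars.rstrip cs := by
  simp [PySem.Chars.rstrip, pv_dropWhile_idem]

theorem pv_chars_strip_rstrip (cs : List Char) :
    PySem.Chars.strip (PySem.Chars.rstrip cs) = PySem.Chars.strip cs := by
  simp only [PySem.Chars.strip]
  rw [pv_lstrip_rstrip_comm, pv_chars_rstrip_idem]

-- Python: line.rstrip().strip() == line.strip()
theorem pv_strip_rstrip (s : String) :
    PySem.Str.strip (PySem.Str.rstrip s) = PySem.Str.strip s := by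
  apply String.toList_inj.mp
  rw [PySem.Str.toList_strip, PySem.Str.toList_strip, PySem.Str.toList_rstrip, pv_chars_strip_rstrip]

-- one step of B does to the expanded accumulator what expanding one step of A's first loop does
theorem pv_step (acc : List String) (skip : Bool) (line : String) :
    pvStepB (pvExpand acc, skip) line =
      (pvExpand (pvStepA1 (acc, skip) line).1, (pvStepA1 (acc, skip) line).2) := by
  simp only [pvStepA1, pvStepB]
  by_cases h1 : PySem.Str.startswith (PySem.Str.strip line) "As a" = true <;>
  by_cases h2 : PySem.Str.startswith (PySem.Str.strip line) "I want" = true <;>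
  by_cases h3 : PySem.Str.startswith (PySem.Str.strip line) "So that" = true <;>
  by_cases h4 : PySem.Str.startswith (PySem.Str.strip line) "Background:" = true <;>
  by_cases h5 : PySem.Str.startswith (PySem.Str.strip line) "Feature:" = true <;>
  by_cases h6 : PySem.Str.startswith (PySem.Str.strip line) "Scenario:" = true <;>
  by_cases h7 : (PySem.Str.strip line == "") = true <;>
  cases skip <;>
    simp only [h1, h2, h3, h4, h5, h6, h7, Bool.false_or, Bool.or_false,
      Bool.false_eq_true, if_true, if_false,
      pvExpand, List.flatMap_append, List.flatMap_cons, List.flatMap_nil,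
      List.append_nil, pv_strip_rstrip, Bool.or_self, reduceIte] <;>
    simp_all [pv_strip_rstrip]

-- B's loop computes the expansion of A's first loop, with the same skip flag
theorem pv_main (lines : List String) : ∀ (skip : Bool) (acc : List String),
    lines.foldl pvStepB (pvExpand acc, skip) =
      (pvExpand ((lines.foldl pvStepA1 (acc, skip)).1), (lines.foldl pvStepA1 (acc, skip)).2) := by
  induction lines with
  | nil => intro skip acc; rfl
  | cons line rest ih =>
    intro skip acc
    simp only [List.foldl_cons, pv_step]
    simpa using ih (pvStepA1 (acc, skip) line).2 (pvStepA1 (acc, skip) line).1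

-- A's second pass on a blank-free list appends exactly the expansion
theorem pv_phase2 (cleaned : List String) : ∀ (acc : List String) (pb : Bool),
    (∀ l ∈ cleaned, (PySem.Str.strip l == "") = false) →
    (cleaned.foldl pvStepA2 (acc, pb)).1 = acc ++ pvExpand cleaned := by
  induction cleaned with
  | nil => intro acc pb _; simp [pvExpand]
  | cons line rest ih =>
    intro acc pb h
    have hl : (PySem.Str.strip line == "") = false := h line (List.mem_cons_self)
    have hr : ∀ l ∈ rest, (PySem.Str.strip l == "") = false := fun l hm => h l (List.mem_cons_of_mem _ hm)
    have hstep : pvStepA2 (acc, pb) line =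
        (acc ++ (line :: (if PySem.Str.startswith (PySem.Str.strip line) "Feature:" then [""] else [])), false) := by
      simp only [pvStepA2, hl]
      split_ifs <;> simp_all
    simp only [List.foldl_cons, hstep]
    rw [ih _ _ hr]
    simp [pvExpand]

-- a line kept by one step of A's first loop is an old line or the rstrip of a non-blank line
theorem pv_stepA1_mem (acc : List String × Bool) (line l : String)
    (hm : l ∈ (pvStepA1 acc line).1) :
    l ∈ acc.1 ∨ (l = PySem.Str.rstrip line ∧ (PySem.Str.strip line == "") = false) := by
  simp only [pvStepA1] at hm
  split_ifs at hm
  all_goals try exact Or.inl hm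
  all_goals
    rcases List.mem_append.mp hm with h' | h'
    · exact Or.inl h'
    · rename_i hblank
      exact Or.inr ⟨by simpa using h', by simpa using hblank⟩

-- every line A's first loop keeps is non-blank
theorem pv_A1_nonblank (lines : List String) : ∀ (skip : Bool) (acc : List String),
    (∀ l ∈ acc, (PySem.Str.strip l == "") = false) →
    ∀ l ∈ (lines.foldl pvStepA1 (acc, skip)).1, (PySem.Str.strip l == "") = false := by
  induction lines with
  | nil => intro skip acc h; simpa using h
  | cons line rest ih =>
    intro skip acc h
    simp only [List.foldl_cons]
    have h' : ∀ l ∈ (pvStepA1 (acc, skip) line).1, (PySem.Str.strip l == "") = false := by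
      intro l hm
      rcases pv_stepA1_mem (acc, skip) line l hm with h'' | ⟨he, hnb⟩
      · exact h l h''
      · rw [he, pv_strip_rstrip]; exact hnb
    simpa using ih (pvStepA1 (acc, skip) line).2 (pvStepA1 (acc, skip) line).1 h'

-- ===== VERDICT (by name: the statement is the Claim_ definition above) =====
theorem clean_gherkin_output_py_spec : Claim_equal_clean_gherkin_output_py := by
  intro content _
  unfold Spec_clean_gherkin_output_py
  show PySem.Str.join "\n"
      (((((PySem.Str.split? (PySem.Str.replace (PySem.Str.replace content "```gherkin" "") "```" "") "\n").getD []).foldl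
          pvStepA1 ([], false)).1).foldl pvStepA2 ([], false)).1 =
    PySem.Str.join "\n"
      ((((PySem.Str.split? (PySem.Str.replace (PySem.Str.replace content "```gherkin" "") "```" "") "\n").getD []).foldl
          pvStepB ([], false)).1)
  generalize (PySem.Str.split? (PySem.Str.replace (PySem.Str.replace content "```gherkin" "") "```" "") "\n").getD [] = lines
  have hnb := pv_A1_nonblank lines false [] (by simp)
  rw [pv_phase2 _ [] false hnb]
  have h1 := pv_main lines false []
  have h0 : pvExpand ([] : List String) = [] := rfl
  rw [h0] at h1
  rw [h1]
  rfl
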